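-- pv_equiv track=rewrite | github.com/vibhu1212/AI-based-fraud-detection-and-damage-analysis-system-for-car-insurance- | backend/app/tasks/icve_calculation_v2.py | determine_vehicle_segment
-- ===== SOURCE A (Python) =====
-- def determine_vehicle_segment(brand: str, model: str) -> str:
--     """
--     Determine vehicle segment from brand and model.
--
--     Args:
--         brand: Vehicle brand
--         model: Vehicle model
--
--     Returns:
--         Segment name (hatchback, compact_suv, etc.)
--     """
--     brand_lower = brand.lower()
--     model_lower = model.lower()
--
--     # Micro segment
--     if any(x in model_lower for x in ["alto", "kwid", "s-presso"]):
--         return "micro"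
--
--     # Hatchback segment
--     if any(x in model_lower for x in ["swift", "i20", "baleno", "tiago", "altroz", "polo", "jazz"]):
--         return "hatchback"
--
--     # Compact sedan
--     if any(x in model_lower for x in ["dzire", "aura", "amaze", "tigor", "aspire"]):
--         return "compact_sedan"
--
--     # Mid-size sedan
--     if any(x in model_lower for x in ["verna", "city", "virtus", "slavia", "ciaz"]):
--         return "sedan"
--
--     # Compact SUV
--     if any(x in model_lower for x in ["nexon", "venue", "sonet", "brezza", "xuv300", "punch", "exter", "fronx"]):
--         return "compact_suv"
--
--     # Mid-size SUV
--     if any(x in model_lower for x in ["creta", "seltos", "harrier", "hector", "xuv700", "taigun", "kushaq", "astor"]):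
--         return "midsize_suv"
--
--     # Full-size SUV
--     if any(x in model_lower for x in ["fortuner", "endeavour", "scorpio", "safari", "alcazar"]):
--         return "fullsize_suv"
--
--     # Luxury
--     if any(x in brand_lower for x in ["mercedes", "bmw", "audi", "lexus", "volvo", "jaguar", "land rover"]):
--         return "luxury"
--
--     # Super luxury
--     if any(x in brand_lower for x in ["rolls royce", "bentley", "lamborghini", "ferrari", "porsche", "maserati"]):
--         return "super_luxury"
--
--     # Default to hatchback
--     return "hatchback"
-- ===== SOURCE B (Python) =====
-- # Inverted dictionary matching: instead of testing each keyword with `k in text`,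
-- # enumerate the substrings of the input at the keyword lengths, look them up in a
-- # precomputed keyword->priority hash map, and take the minimum matched priority.
-- # A's first-match cascade equals the minimum group index among matched groups.
--
-- _SEGMENTS = ["micro", "hatchback", "compact_sedan", "sedan", "compact_suv",
--              "midsize_suv", "fullsize_suv", "luxury", "super_luxury"]
--
-- _MODEL_KW = {
--     "alto": 0, "kwid": 0, "s-presso": 0,
--     "swift": 1, "i20": 1, "baleno": 1, "tiago": 1, "altroz": 1, "polo": 1, "jazz": 1,
--     "dzire": 2, "aura": 2, "amaze": 2, "tigor": 2, "aspire": 2,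
--     "verna": 3, "city": 3, "virtus": 3, "slavia": 3, "ciaz": 3,
--     "nexon": 4, "venue": 4, "sonet": 4, "brezza": 4, "xuv300": 4, "punch": 4, "exter": 4, "fronx": 4,
--     "creta": 5, "seltos": 5, "harrier": 5, "hector": 5, "xuv700": 5, "taigun": 5, "kushaq": 5, "astor": 5,
--     "fortuner": 6, "endeavour": 6, "scorpio": 6, "safari": 6, "alcazar": 6,
-- }
--
-- _BRAND_KW = {
--     "mercedes": 7, "bmw": 7, "audi": 7, "lexus": 7, "volvo": 7, "jaguar": 7, "land rover": 7,
--     "rolls royce": 8, "bentley": 8, "lamborghini": 8, "ferrari": 8, "porsche": 8, "maserati": 8,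
-- }
--
-- _MODEL_LENS = sorted({len(k) for k in _MODEL_KW})
-- _BRAND_LENS = sorted({len(k) for k in _BRAND_KW})
--
--
-- def _min_hit(text, table, lens):
--     """Minimum priority of any table keyword occurring in text, or None."""
--     hits = [p for i in range(len(text))
--               for p in (table.get(text[i:i + L]) for L in lens)
--               if p is not None]
--     return min(hits, default=None)
--
--
-- def determine_vehicle_segment(brand: str, model: str) -> str:
--     m = _min_hit(model.lower(), _MODEL_KW, _MODEL_LENS)
--     b = _min_hit(brand.lower(), _BRAND_KW, _BRAND_LENS)
--     best = min((x for x in (m, b) if x is not None), default=None)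
--     return "hatchback" if best is None else _SEGMENTS[best]
-- ===== Notes on version B (the rewrite author's own statement) =====
-- stated objective: alternative
-- what changed: Inverts the matching direction: instead of A's nine-stage cascade testing each keyword with 'k in text', B enumerates the input's substrings at the precomputed keyword lengths, looks each up in a keyword-to-priority hash map, and returns the segment of the minimum matched priority (first-match cascade = minimum group index).
import Mathlib
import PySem

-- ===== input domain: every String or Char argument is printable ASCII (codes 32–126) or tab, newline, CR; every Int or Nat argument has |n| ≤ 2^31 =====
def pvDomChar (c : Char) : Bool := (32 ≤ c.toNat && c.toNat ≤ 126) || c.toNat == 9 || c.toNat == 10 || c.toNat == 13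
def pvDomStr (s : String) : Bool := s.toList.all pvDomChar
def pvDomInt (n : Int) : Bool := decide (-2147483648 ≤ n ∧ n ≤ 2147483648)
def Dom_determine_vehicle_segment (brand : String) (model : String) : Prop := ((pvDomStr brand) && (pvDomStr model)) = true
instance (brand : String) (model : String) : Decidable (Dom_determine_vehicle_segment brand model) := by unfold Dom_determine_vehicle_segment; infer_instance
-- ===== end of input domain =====

-- B inverts the matching direction: it enumerates the input's substrings at the keyword lengths, looks them
-- up in a keyword→priority map, and returns the segment of the minimum matched priority (alternative algorithm).

-- ===== PORT A =====
def determine_vehicle_segment (brand : String) (model : String) : String :=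
  let brand_lower := PySem.Str.lower brand
  let model_lower := PySem.Str.lower model
  if ["alto", "kwid", "s-presso"].any (fun x => PySem.Str.isIn x model_lower) then "micro"
  else if ["swift", "i20", "baleno", "tiago", "altroz", "polo", "jazz"].any (fun x => PySem.Str.isIn x model_lower) then "hatchback"
  else if ["dzire", "aura", "amaze", "tigor", "aspire"].any (fun x => PySem.Str.isIn x model_lower) then "compact_sedan"
  else if ["verna", "city", "virtus", "slavia", "ciaz"].any (fun x => PySem.Str.isIn x model_lower) then "sedan"
  else if ["nexon", "venue", "sonet", "brezza", "xuv300", "punch", "exter", "fronx"].any (fun x => PySem.Str.isIn x model_lower) then "compact_suv"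
  else if ["creta", "seltos", "harrier", "hector", "xuv700", "taigun", "kushaq", "astor"].any (fun x => PySem.Str.isIn x model_lower) then "midsize_suv"
  else if ["fortuner", "endeavour", "scorpio", "safari", "alcazar"].any (fun x => PySem.Str.isIn x model_lower) then "fullsize_suv"
  else if ["mercedes", "bmw", "audi", "lexus", "volvo", "jaguar", "land rover"].any (fun x => PySem.Str.isIn x brand_lower) then "luxury"
  else if ["rolls royce", "bentley", "lamborghini", "ferrari", "porsche", "maserati"].any (fun x => PySem.Str.isIn x brand_lower) then "super_luxury"
  else "hatchback"

-- ===== PORT B =====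
def pvSegments : List String :=
  ["micro", "hatchback", "compact_sedan", "sedan", "compact_suv", "midsize_suv", "fullsize_suv", "luxury", "super_luxury"]

def pvModelKw : PySem.Dict String Int := PySem.Dict.ofList
  [("alto",0),("kwid",0),("s-presso",0),
   ("swift",1),("i20",1),("baleno",1),("tiago",1),("altroz",1),("polo",1),("jazz",1),
   ("dzire",2),("aura",2),("amaze",2),("tigor",2),("aspire",2),
   ("verna",3),("city",3),("virtus",3),("slavia",3),("ciaz",3),
   ("nexon",4),("venue",4),("sonet",4),("brezza",4),("xuv300",4),("punch",4),("exter",4),("fronx",4),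
   ("creta",5),("seltos",5),("harrier",5),("hector",5),("xuv700",5),("taigun",5),("kushaq",5),("astor",5),
   ("fortuner",6),("endeavour",6),("scorpio",6),("safari",6),("alcazar",6)]

def pvBrandKw : PySem.Dict String Int := PySem.Dict.ofList
  [("mercedes",7),("bmw",7),("audi",7),("lexus",7),("volvo",7),("jaguar",7),("land rover",7),
   ("rolls royce",8),("bentley",8),("lamborghini",8),("ferrari",8),("porsche",8),("maserati",8)]

-- sorted({len(k) for k in table})
def pvModelLens : List Int := PySem.List.sorted (PySem.Set.ofList (pvModelKw.keys.map PySem.Str.len)) (fun x => x)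
def pvBrandLens : List Int := PySem.List.sorted (PySem.Set.ofList (pvBrandKw.keys.map PySem.Str.len)) (fun x => x)

-- _min_hit: minimum priority of any table keyword occurring in text, or None
def pvMinHit (text : String) (table : PySem.Dict String Int) (lens : List Int) : Option Int :=
  let hits := (PySem.List.pyRange 0 (PySem.Str.len text) 1).flatMap
    (fun i => lens.filterMap (fun L => table.get? (PySem.Str.slice text (some i) (some (i + L)))))
  PySem.List.min? hits (fun p => p)

def determine_vehicle_segment_alt (brand : String) (model : String) : String :=
  let m := pvMinHit (PySem.Str.lower model) pvModelKw pvModelLens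
  let b := pvMinHit (PySem.Str.lower brand) pvBrandKw pvBrandLens
  match PySem.List.min? ([m, b].filterMap id) (fun x => x) with
  | none => "hatchback"
  | some p => PySem.List.pyGetD pvSegments p ""

-- ===== PRECONDITION & SPEC =====
def Spec_determine_vehicle_segment (brand : String) (model : String) (out : String) : Prop := out = determine_vehicle_segment_alt brand model
instance (brand : String) (model : String) (out : String) : Decidable (Spec_determine_vehicle_segment brand model out) := by unfold Spec_determine_vehicle_segment; infer_instance

-- ===== CLAIM (what is proved, stated in full; the proofs are below) =====
def Claim_equal_determine_vehicle_segment : Prop := ∀ (brand : String) (model : String), Dom_determine_vehicle_segment brand model → Spec_determine_vehicle_segment brand model (determine_vehicle_segment brand model)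

-- ===== LEMMAS AND PROOFS =====

-- "k occurs in t" ↔ "some fixed-length window of t equals k"
theorem pv_isIn_iff_window (k t : String) (hk : k.toList ≠ []) :
    PySem.Str.isIn k t = true ↔
      ∃ i : Nat, i < t.toList.length ∧ List.take k.toList.length (List.drop i t.toList) = k.toList := by
  constructor
  · intro h
    obtain ⟨j, hj⟩ := (PySem.Chars.exists_prefix_drop_iff_isIn k.toList t.toList).mpr (by simpa using h)
    refine ⟨j, ?_, (List.prefix_iff_eq_take.mp hj).symm⟩
    by_contra hlt
    have : List.drop j t.toList = [] := List.drop_eq_nil_of_le (by omega)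
    rw [this] at hj
    exact hk (List.prefix_nil.mp hj)
  · rintro ⟨i, _, hw⟩
    have hpre : k.toList <+: List.drop i t.toList :=
      List.prefix_iff_eq_take.mpr hw.symm
    have := (PySem.Chars.exists_prefix_drop_iff_isIn k.toList t.toList).mp ⟨i, hpre⟩
    simpa using this

-- a hit of the table in the text
def pvHit (text : String) (table : PySem.Dict String Int) (q : Int) : Prop :=
  ∃ kv ∈ table.items, kv.2 = q ∧ PySem.Str.isIn kv.1 text = true

-- membership in the candidate list of pvMinHit = a hit
theorem pv_mem_hits_iff (text : String) (table : PySem.Dict String Int) (lens : List Int)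
    (hnd : table.keys.Nodup)
    (hkeys : ∀ kv ∈ table.items, kv.1.toList ≠ [] ∧ ((kv.1.toList.length : Int)) ∈ lens)
    (hlens : ∀ L ∈ lens, 0 ≤ L) (q : Int) :
    (q ∈ (PySem.List.pyRange 0 (PySem.Str.len text) 1).flatMap
      (fun i => lens.filterMap (fun L => table.get? (PySem.Str.slice text (some i) (some (i + L)))))) ↔
    pvHit text table q := by
  rw [List.mem_flatMap]
  constructor
  · rintro ⟨i, hi, hq⟩
    obtain ⟨L, hL, hget⟩ := List.mem_filterMap.mp hq
    have hi' := PySem.List.mem_pyRange_one.mp hi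
    have hL0 := hlens L hL
    refine ⟨(PySem.Str.slice text (some i) (some (i + L)), q),
      (PySem.Dict.get?_eq_some_iff_mem_items table _ q hnd).mp hget, rfl, ?_⟩
    rw [PySem.Str.isIn_iff_infix, PySem.Str.toList_slice, PySem.Chars.slice_eq_listSlice,
      PySem.List.slice_toNat text.toList hi'.1 (by omega)]
    exact ((List.take_prefix _ _).isInfix).trans (List.drop_suffix _ _).isInfix
  · rintro ⟨⟨k, v⟩, hmem, hv, hin⟩
    obtain ⟨hne, hlen⟩ := hkeys _ hmem
    obtain ⟨i, hi, hw⟩ := (pv_isIn_iff_window k text hne).mp hin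
    refine ⟨(i : Int), PySem.List.mem_pyRange_one.mpr ⟨by omega, by rw [PySem.Str.len_eq]; omega⟩, ?_⟩
    refine List.mem_filterMap.mpr ⟨(k.toList.length : Int), hlen, ?_⟩
    have hslice : PySem.Str.slice text (some (i : Int)) (some ((i : Int) + (k.toList.length : Int))) = k := by
      apply String.ext
      rw [PySem.Str.toList_slice, PySem.Chars.slice_eq_listSlice, PySem.List.slice_natCast_add]
      exact hw
    rw [hslice]
    subst hv
    exact PySem.Dict.get?_of_mem_items table hmem hnd

theorem pvMinHit_none_iff (text : String) (table : PySem.Dict String Int) (lens : List Int)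
    (hnd : table.keys.Nodup)
    (hkeys : ∀ kv ∈ table.items, kv.1.toList ≠ [] ∧ ((kv.1.toList.length : Int)) ∈ lens)
    (hlens : ∀ L ∈ lens, 0 ≤ L) :
    pvMinHit text table lens = none ↔ ∀ q, ¬ pvHit text table q := by
  unfold pvMinHit
  rw [PySem.List.min?_eq_none_iff, List.eq_nil_iff_forall_not_mem]
  exact forall_congr' fun q => not_congr (pv_mem_hits_iff text table lens hnd hkeys hlens q)

theorem pvMinHit_some (text : String) (table : PySem.Dict String Int) (lens : List Int)
    (hnd : table.keys.Nodup)
    (hkeys : ∀ kv ∈ table.items, kv.1.toList ≠ [] ∧ ((kv.1.toList.length : Int)) ∈ lens)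
    (hlens : ∀ L ∈ lens, 0 ≤ L) (p : Int)
    (h : pvMinHit text table lens = some p) :
    pvHit text table p ∧ ∀ q, pvHit text table q → p ≤ q := by
  constructor
  · exact (pv_mem_hits_iff text table lens hnd hkeys hlens p).mp (PySem.List.min?_mem h)
  · intro q hq
    exact PySem.List.min?_isMin h q ((pv_mem_hits_iff text table lens hnd hkeys hlens q).mpr hq)

-- concrete table facts
set_option maxRecDepth 100000 in
theorem pvModelKw_items : pvModelKw.items =
  [("alto",0),("kwid",0),("s-presso",0),
   ("swift",1),("i20",1),("baleno",1),("tiago",1),("altroz",1),("polo",1),("jazz",1),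
   ("dzire",2),("aura",2),("amaze",2),("tigor",2),("aspire",2),
   ("verna",3),("city",3),("virtus",3),("slavia",3),("ciaz",3),
   ("nexon",4),("venue",4),("sonet",4),("brezza",4),("xuv300",4),("punch",4),("exter",4),("fronx",4),
   ("creta",5),("seltos",5),("harrier",5),("hector",5),("xuv700",5),("taigun",5),("kushaq",5),("astor",5),
   ("fortuner",6),("endeavour",6),("scorpio",6),("safari",6),("alcazar",6)] := by decide

set_option maxRecDepth 100000 in
theorem pvBrandKw_items : pvBrandKw.items =
  [("mercedes",7),("bmw",7),("audi",7),("lexus",7),("volvo",7),("jaguar",7),("land rover",7),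
   ("rolls royce",8),("bentley",8),("lamborghini",8),("ferrari",8),("porsche",8),("maserati",8)] := by decide

set_option maxRecDepth 100000 in
theorem pvModelKw_nodup : pvModelKw.keys.Nodup := by decide
set_option maxRecDepth 100000 in
theorem pvBrandKw_nodup : pvBrandKw.keys.Nodup := by decide
set_option maxRecDepth 100000 in
theorem pvModelKw_keys : ∀ kv ∈ pvModelKw.items, kv.1.toList ≠ [] ∧ ((kv.1.toList.length : Int)) ∈ pvModelLens := by decide
set_option maxRecDepth 100000 in
theorem pvBrandKw_keys : ∀ kv ∈ pvBrandKw.items, kv.1.toList ≠ [] ∧ ((kv.1.toList.length : Int)) ∈ pvBrandLens := by decide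
set_option maxRecDepth 100000 in
theorem pvModelLens_nonneg : ∀ L ∈ pvModelLens, 0 ≤ L := by decide
set_option maxRecDepth 100000 in
theorem pvBrandLens_nonneg : ∀ L ∈ pvBrandLens, 0 ≤ L := by decide

-- group-g condition, exactly the conditions of A's cascade
def pvAnyModel (ml : String) (g : Int) : Bool :=
  if g = 0 then ["alto", "kwid", "s-presso"].any (fun x => PySem.Str.isIn x ml)
  else if g = 1 then ["swift", "i20", "baleno", "tiago", "altroz", "polo", "jazz"].any (fun x => PySem.Str.isIn x ml)
  else if g = 2 then ["dzire", "aura", "amaze", "tigor", "aspire"].any (fun x => PySem.Str.isIn x ml)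
  else if g = 3 then ["verna", "city", "virtus", "slavia", "ciaz"].any (fun x => PySem.Str.isIn x ml)
  else if g = 4 then ["nexon", "venue", "sonet", "brezza", "xuv300", "punch", "exter", "fronx"].any (fun x => PySem.Str.isIn x ml)
  else if g = 5 then ["creta", "seltos", "harrier", "hector", "xuv700", "taigun", "kushaq", "astor"].any (fun x => PySem.Str.isIn x ml)
  else if g = 6 then ["fortuner", "endeavour", "scorpio", "safari", "alcazar"].any (fun x => PySem.Str.isIn x ml)
  else false

def pvAnyBrand (bl : String) (g : Int) : Bool :=
  if g = 7 then ["mercedes", "bmw", "audi", "lexus", "volvo", "jaguar", "land rover"].any (fun x => PySem.Str.isIn x bl)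
  else if g = 8 then ["rolls royce", "bentley", "lamborghini", "ferrari", "porsche", "maserati"].any (fun x => PySem.Str.isIn x bl)
  else false

theorem pvHit_model_iff (ml : String) (q : Int) :
    pvHit ml pvModelKw q ↔ (0 ≤ q ∧ q ≤ 6 ∧ pvAnyModel ml q = true) := by
  unfold pvHit pvAnyModel
  rw [pvModelKw_items]
  split_ifs with h0 h1 h2 h3 h4 h5 h6
  · subst h0; simp
  · subst h1; simp
  · subst h2; simp
  · subst h3; simp
  · subst h4; simp
  · subst h5; simp
  · subst h6; simp
  · simp only [and_false, iff_false]
    rintro ⟨kv, hm, hv, hin⟩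
    simp only [List.mem_cons, List.not_mem_nil, or_false] at hm
    rcases hm with h|h|h|h|h|h|h|h|h|h|h|h|h|h|h|h|h|h|h|h|h|h|h|h|h|h|h|h|h|h|h|h|h|h|h|h|h|h|h|h|h <;>
      (subst h; simp at hv; omega)

theorem pvHit_brand_iff (bl : String) (q : Int) :
    pvHit bl pvBrandKw q ↔ ((q = 7 ∨ q = 8) ∧ pvAnyBrand bl q = true) := by
  unfold pvHit pvAnyBrand
  rw [pvBrandKw_items]
  split_ifs with h7 h8
  · subst h7; simp
  · subst h8; simp
  · simp only [and_false, iff_false]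
    rintro ⟨kv, hm, hv, hin⟩
    simp only [List.mem_cons, List.not_mem_nil, or_false] at hm
    rcases hm with h|h|h|h|h|h|h|h|h|h|h|h|h <;>
      (subst h; simp at hv; omega)

theorem pvAnyModel_range (ml : String) (q : Int) (h : pvAnyModel ml q = true) : 0 ≤ q ∧ q ≤ 6 := by
  unfold pvAnyModel at h; split_ifs at h <;> omega

theorem pvAnyBrand_range (bl : String) (q : Int) (h : pvAnyBrand bl q = true) : q = 7 ∨ q = 8 := by
  unfold pvAnyBrand at h; split_ifs at h <;> omega

-- combined hit of either table
def pvHitAll (bl ml : String) (q : Int) : Prop := pvHit ml pvModelKw q ∨ pvHit bl pvBrandKw q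

theorem pvHitAll_iff (bl ml : String) (q : Int) :
    pvHitAll bl ml q ↔ (0 ≤ q ∧ q ≤ 8 ∧ (pvAnyModel ml q || pvAnyBrand bl q) = true) := by
  unfold pvHitAll
  rw [pvHit_model_iff, pvHit_brand_iff]
  constructor
  · rintro (⟨h0, h6, h⟩|⟨h78, h⟩)
    · exact ⟨h0, by omega, by simp [h]⟩
    · exact ⟨by omega, by omega, by simp [h]⟩
  · rintro ⟨h0, h8, h⟩
    rcases Bool.or_eq_true_iff.mp h with h|h
    · exact Or.inl ⟨h0, (pvAnyModel_range ml q h).2, h⟩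
    · exact Or.inr ⟨pvAnyBrand_range bl q h, h⟩

theorem pvBest_none_iff (bl ml : String) :
    PySem.List.min? ([pvMinHit ml pvModelKw pvModelLens, pvMinHit bl pvBrandKw pvBrandLens].filterMap id) (fun x => x) = none ↔
      ∀ q, ¬ pvHitAll bl ml q := by
  rw [PySem.List.min?_eq_none_iff]
  constructor
  · intro h q hq
    rcases hm : pvMinHit ml pvModelKw pvModelLens with _|pm <;>
      rcases hb : pvMinHit bl pvBrandKw pvBrandLens with _|pb <;>
      rw [hm, hb] at h <;> simp at h
    rcases hq with hq|hq
    · exact (pvMinHit_none_iff ml pvModelKw pvModelLens pvModelKw_nodup pvModelKw_keys pvModelLens_nonneg).mp hm q hq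
    · exact (pvMinHit_none_iff bl pvBrandKw pvBrandLens pvBrandKw_nodup pvBrandKw_keys pvBrandLens_nonneg).mp hb q hq
  · intro h
    have hm : pvMinHit ml pvModelKw pvModelLens = none :=
      (pvMinHit_none_iff ml pvModelKw pvModelLens pvModelKw_nodup pvModelKw_keys pvModelLens_nonneg).mpr
        (fun q hq => h q (Or.inl hq))
    have hb : pvMinHit bl pvBrandKw pvBrandLens = none :=
      (pvMinHit_none_iff bl pvBrandKw pvBrandLens pvBrandKw_nodup pvBrandKw_keys pvBrandLens_nonneg).mpr
        (fun q hq => h q (Or.inr hq))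
    rw [hm, hb]; rfl

theorem pvBest_some (bl ml : String) (p : Int)
    (h : PySem.List.min? ([pvMinHit ml pvModelKw pvModelLens, pvMinHit bl pvBrandKw pvBrandLens].filterMap id) (fun x => x) = some p) :
    pvHitAll bl ml p ∧ ∀ q, pvHitAll bl ml q → p ≤ q := by
  have hmem := PySem.List.min?_mem h
  have hmem' : pvMinHit ml pvModelKw pvModelLens = some p ∨ pvMinHit bl pvBrandKw pvBrandLens = some p := by
    obtain ⟨o, ho, hop⟩ := List.mem_filterMap.mp hmem
    simp only [id_eq] at hop
    simp only [List.mem_cons, List.not_mem_nil, or_false] at ho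
    rcases ho with ho|ho
    · exact Or.inl (by rw [← ho]; exact hop)
    · exact Or.inr (by rw [← ho]; exact hop)
  constructor
  · rcases hmem' with hm|hb
    · exact Or.inl (pvMinHit_some ml pvModelKw pvModelLens pvModelKw_nodup pvModelKw_keys pvModelLens_nonneg p hm).1
    · exact Or.inr (pvMinHit_some bl pvBrandKw pvBrandLens pvBrandKw_nodup pvBrandKw_keys pvBrandLens_nonneg p hb).1
  · rintro q (hq|hq)
    · rcases hm : pvMinHit ml pvModelKw pvModelLens with _|pm
      · exact absurd hq ((pvMinHit_none_iff ml pvModelKw pvModelLens pvModelKw_nodup pvModelKw_keys pvModelLens_nonneg).mp hm q)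
      · have h1 : pm ≤ q := (pvMinHit_some ml pvModelKw pvModelLens pvModelKw_nodup pvModelKw_keys pvModelLens_nonneg pm hm).2 q hq
        have h2 : p ≤ pm := PySem.List.min?_isMin h pm (List.mem_filterMap.mpr ⟨some pm, by simp [hm], rfl⟩)
        omega
    · rcases hb : pvMinHit bl pvBrandKw pvBrandLens with _|pb
      · exact absurd hq ((pvMinHit_none_iff bl pvBrandKw pvBrandLens pvBrandKw_nodup pvBrandKw_keys pvBrandLens_nonneg).mp hb q)
      · have h1 : pb ≤ q := (pvMinHit_some bl pvBrandKw pvBrandLens pvBrandKw_nodup pvBrandKw_keys pvBrandLens_nonneg pb hb).2 q hq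
        have h2 : p ≤ pb := PySem.List.min?_isMin h pb (List.mem_filterMap.mpr ⟨some pb, by simp [hb], rfl⟩)
        omega

theorem pvBest_eq_some (bl ml : String) (g : Int)
    (h1 : pvHitAll bl ml g) (h2 : ∀ q, pvHitAll bl ml q → g ≤ q) :
    PySem.List.min? ([pvMinHit ml pvModelKw pvModelLens, pvMinHit bl pvBrandKw pvBrandLens].filterMap id) (fun x => x) = some g := by
  rcases h : PySem.List.min? ([pvMinHit ml pvModelKw pvModelLens, pvMinHit bl pvBrandKw pvBrandLens].filterMap id) (fun x => x) with _|p
  · exact absurd h1 ((pvBest_none_iff bl ml).mp h g)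
  · obtain ⟨hp, hmin⟩ := pvBest_some bl ml p h
    have := hmin g h1
    have := h2 p hp
    congr 1; omega

theorem pvAlt_eq_seg (brand model : String) (g : Int)
    (hg : PySem.List.min? ([pvMinHit (PySem.Str.lower model) pvModelKw pvModelLens, pvMinHit (PySem.Str.lower brand) pvBrandKw pvBrandLens].filterMap id) (fun x => x) = some g) :
    determine_vehicle_segment_alt brand model = PySem.List.pyGetD pvSegments g "" := by
  unfold determine_vehicle_segment_alt
  simp only [hg]

theorem pvAlt_eq_default (brand model : String)
    (hg : PySem.List.min? ([pvMinHit (PySem.Str.lower model) pvModelKw pvModelLens, pvMinHit (PySem.Str.lower brand) pvBrandKw pvBrandLens].filterMap id) (fun x => x) = none) :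
    determine_vehicle_segment_alt brand model = "hatchback" := by
  unfold determine_vehicle_segment_alt
  simp only [hg]

theorem pvC0 (bl ml : String) : (pvAnyModel ml 0 || pvAnyBrand bl 0) = (["alto", "kwid", "s-presso"].any (fun x => PySem.Str.isIn x ml)) := by
  norm_num [pvAnyModel, pvAnyBrand]

theorem pvC1 (bl ml : String) : (pvAnyModel ml 1 || pvAnyBrand bl 1) = (["swift", "i20", "baleno", "tiago", "altroz", "polo", "jazz"].any (fun x => PySem.Str.isIn x ml)) := by
  norm_num [pvAnyModel, pvAnyBrand]

theorem pvC2 (bl ml : String) : (pvAnyModel ml 2 || pvAnyBrand bl 2) = (["dzire", "aura", "amaze", "tigor", "aspire"].any (fun x => PySem.Str.isIn x ml)) := by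
  norm_num [pvAnyModel, pvAnyBrand]

theorem pvC3 (bl ml : String) : (pvAnyModel ml 3 || pvAnyBrand bl 3) = (["verna", "city", "virtus", "slavia", "ciaz"].any (fun x => PySem.Str.isIn x ml)) := by
  norm_num [pvAnyModel, pvAnyBrand]

theorem pvC4 (bl ml : String) : (pvAnyModel ml 4 || pvAnyBrand bl 4) = (["nexon", "venue", "sonet", "brezza", "xuv300", "punch", "exter", "fronx"].any (fun x => PySem.Str.isIn x ml)) := by
  norm_num [pvAnyModel, pvAnyBrand]

theorem pvC5 (bl ml : String) : (pvAnyModel ml 5 || pvAnyBrand bl 5) = (["creta", "seltos", "harrier", "hector", "xuv700", "taigun", "kushaq", "astor"].any (fun x => PySem.Str.isIn x ml)) := by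
  norm_num [pvAnyModel, pvAnyBrand]

theorem pvC6 (bl ml : String) : (pvAnyModel ml 6 || pvAnyBrand bl 6) = (["fortuner", "endeavour", "scorpio", "safari", "alcazar"].any (fun x => PySem.Str.isIn x ml)) := by
  norm_num [pvAnyModel, pvAnyBrand]

theorem pvC7 (bl ml : String) : (pvAnyModel ml 7 || pvAnyBrand bl 7) = (["mercedes", "bmw", "audi", "lexus", "volvo", "jaguar", "land rover"].any (fun x => PySem.Str.isIn x bl)) := by
  norm_num [pvAnyModel, pvAnyBrand]

theorem pvC8 (bl ml : String) : (pvAnyModel ml 8 || pvAnyBrand bl 8) = (["rolls royce", "bentley", "lamborghini", "ferrari", "porsche", "maserati"].any (fun x => PySem.Str.isIn x bl)) := by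
  norm_num [pvAnyModel, pvAnyBrand]

theorem pvStep (bl ml : String) (g : Int) (hg0 : 0 ≤ g) (hg8 : g ≤ 8)
    (hcond : (pvAnyModel ml g || pvAnyBrand bl g) = true)
    (hprev : ∀ j, 0 ≤ j → j < g → (pvAnyModel ml j || pvAnyBrand bl j) = false) :
    PySem.List.min? ([pvMinHit ml pvModelKw pvModelLens, pvMinHit bl pvBrandKw pvBrandLens].filterMap id) (fun x => x) = some g := by
  apply pvBest_eq_some
  · exact (pvHitAll_iff bl ml g).mpr ⟨hg0, hg8, hcond⟩
  · intro q hq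
    obtain ⟨hq0, hq8, hc⟩ := (pvHitAll_iff bl ml q).mp hq
    by_contra hlt
    rw [hprev q hq0 (by omega)] at hc
    cases hc

-- ===== VERDICT (by name: the statement is the Claim_ definition above) =====
set_option maxHeartbeats 4000000 in
theorem determine_vehicle_segment_spec : Claim_equal_determine_vehicle_segment := by
  intro brand model _
  show determine_vehicle_segment brand model = determine_vehicle_segment_alt brand model
  simp only [determine_vehicle_segment]
  by_cases c0 : (["alto", "kwid", "s-presso"].any (fun x => PySem.Str.isIn x (PySem.Str.lower model))) = true
  · rw [if_pos c0, pvAlt_eq_seg brand model 0 (pvStep (PySem.Str.lower brand) (PySem.Str.lower model) 0 (by norm_num) (by norm_num) (by rw [pvC0 (PySem.Str.lower brand) (PySem.Str.lower model)]; exact c0) (fun j hj0 hjg => absurd hjg (by omega)))]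
    decide
  · rw [if_neg c0]
    by_cases c1 : (["swift", "i20", "baleno", "tiago", "altroz", "polo", "jazz"].any (fun x => PySem.Str.isIn x (PySem.Str.lower model))) = true
    · rw [if_pos c1, pvAlt_eq_seg brand model 1 (pvStep (PySem.Str.lower brand) (PySem.Str.lower model) 1 (by norm_num) (by norm_num) (by rw [pvC1 (PySem.Str.lower brand) (PySem.Str.lower model)]; exact c1) (by intro j hj0 hjg; interval_cases j <;> first | (rw [pvC0 (PySem.Str.lower brand) (PySem.Str.lower model)]; exact Bool.eq_false_iff.mpr c0)))]
      decide
    · rw [if_neg c1]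
      by_cases c2 : (["dzire", "aura", "amaze", "tigor", "aspire"].any (fun x => PySem.Str.isIn x (PySem.Str.lower model))) = true
      · rw [if_pos c2, pvAlt_eq_seg brand model 2 (pvStep (PySem.Str.lower brand) (PySem.Str.lower model) 2 (by norm_num) (by norm_num) (by rw [pvC2 (PySem.Str.lower brand) (PySem.Str.lower model)]; exact c2) (by intro j hj0 hjg; interval_cases j <;> first | (rw [pvC0 (PySem.Str.lower brand) (PySem.Str.lower model)]; exact Bool.eq_false_iff.mpr c0) | (rw [pvC1 (PySem.Str.lower brand) (PySem.Str.lower model)]; exact Bool.eq_false_iff.mpr c1)))]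
        decide
      · rw [if_neg c2]
        by_cases c3 : (["verna", "city", "virtus", "slavia", "ciaz"].any (fun x => PySem.Str.isIn x (PySem.Str.lower model))) = true
        · rw [if_pos c3, pvAlt_eq_seg brand model 3 (pvStep (PySem.Str.lower brand) (PySem.Str.lower model) 3 (by norm_num) (by norm_num) (by rw [pvC3 (PySem.Str.lower brand) (PySem.Str.lower model)]; exact c3) (by intro j hj0 hjg; interval_cases j <;> first | (rw [pvC0 (PySem.Str.lower brand) (PySem.Str.lower model)]; exact Bool.eq_false_iff.mpr c0) | (rw [pvC1 (PySem.Str.lower brand) (PySem.Str.lower model)]; exact Bool.eq_false_iff.mpr c1) | (rw [pvC2 (PySem.Str.lower brand) (PySem.Str.lower model)]; exact Bool.eq_false_iff.mpr c2)))]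
          decide
        · rw [if_neg c3]
          by_cases c4 : (["nexon", "venue", "sonet", "brezza", "xuv300", "punch", "exter", "fronx"].any (fun x => PySem.Str.isIn x (PySem.Str.lower model))) = true
          · rw [if_pos c4, pvAlt_eq_seg brand model 4 (pvStep (PySem.Str.lower brand) (PySem.Str.lower model) 4 (by norm_num) (by norm_num) (by rw [pvC4 (PySem.Str.lower brand) (PySem.Str.lower model)]; exact c4) (by intro j hj0 hjg; interval_cases j <;> first | (rw [pvC0 (PySem.Str.lower brand) (PySem.Str.lower model)]; exact Bool.eq_false_iff.mpr c0) | (rw [pvC1 (PySem.Str.lower brand) (PySem.Str.lower model)]; exact Bool.eq_false_iff.mpr c1) | (rw [pvC2 (PySem.Str.lower brand) (PySem.Str.lower model)]; exact Bool.eq_false_iff.mpr c2) | (rw [pvC3 (PySem.Str.lower brand) (PySem.Str.lower model)]; exact Bool.eq_false_iff.mpr c3)))]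
            decide
          · rw [if_neg c4]
            by_cases c5 : (["creta", "seltos", "harrier", "hector", "xuv700", "taigun", "kushaq", "astor"].any (fun x => PySem.Str.isIn x (PySem.Str.lower model))) = true
            · rw [if_pos c5, pvAlt_eq_seg brand model 5 (pvStep (PySem.Str.lower brand) (PySem.Str.lower model) 5 (by norm_num) (by norm_num) (by rw [pvC5 (PySem.Str.lower brand) (PySem.Str.lower model)]; exact c5) (by intro j hj0 hjg; interval_cases j <;> first | (rw [pvC0 (PySem.Str.lower brand) (PySem.Str.lower model)]; exact Bool.eq_false_iff.mpr c0) | (rw [pvC1 (PySem.Str.lower brand) (PySem.Str.lower model)]; exact Bool.eq_false_iff.mpr c1) | (rw [pvC2 (PySem.Str.lower brand) (PySem.Str.lower model)]; exact Bool.eq_false_iff.mpr c2) | (rw [pvC3 (PySem.Str.lower brand) (PySem.Str.lower model)]; exact Bool.eq_false_iff.mpr c3) | (rw [pvC4 (PySem.Str.lower brand) (PySem.Str.lower model)]; exact Bool.eq_false_iff.mpr c4)))]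
              decide
            · rw [if_neg c5]
              by_cases c6 : (["fortuner", "endeavour", "scorpio", "safari", "alcazar"].any (fun x => PySem.Str.isIn x (PySem.Str.lower model))) = true
              · rw [if_pos c6, pvAlt_eq_seg brand model 6 (pvStep (PySem.Str.lower brand) (PySem.Str.lower model) 6 (by norm_num) (by norm_num) (by rw [pvC6 (PySem.Str.lower brand) (PySem.Str.lower model)]; exact c6) (by intro j hj0 hjg; interval_cases j <;> first | (rw [pvC0 (PySem.Str.lower brand) (PySem.Str.lower model)]; exact Bool.eq_false_iff.mpr c0) | (rw [pvC1 (PySem.Str.lower brand) (PySem.Str.lower model)]; exact Bool.eq_false_iff.mpr c1) | (rw [pvC2 (PySem.Str.lower brand) (PySem.Str.lower model)]; exact Bool.eq_false_iff.mpr c2) | (rw [pvC3 (PySem.Str.lower brand) (PySem.Str.lower model)]; exact Bool.eq_false_iff.mpr c3) | (rw [pvC4 (PySem.Str.lower brand) (PySem.Str.lower model)]; exact Bool.eq_false_iff.mpr c4) | (rw [pvC5 (PySem.Str.lower brand) (PySem.Str.lower model)]; exact Bool.eq_false_iff.mpr c5)))]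
                decide
              · rw [if_neg c6]
                by_cases c7 : (["mercedes", "bmw", "audi", "lexus", "volvo", "jaguar", "land rover"].any (fun x => PySem.Str.isIn x (PySem.Str.lower brand))) = true
                · rw [if_pos c7, pvAlt_eq_seg brand model 7 (pvStep (PySem.Str.lower brand) (PySem.Str.lower model) 7 (by norm_num) (by norm_num) (by rw [pvC7 (PySem.Str.lower brand) (PySem.Str.lower model)]; exact c7) (by intro j hj0 hjg; interval_cases j <;> first | (rw [pvC0 (PySem.Str.lower brand) (PySem.Str.lower model)]; exact Bool.eq_false_iff.mpr c0) | (rw [pvC1 (PySem.Str.lower brand) (PySem.Str.lower model)]; exact Bool.eq_false_iff.mpr c1) | (rw [pvC2 (PySem.Str.lower brand) (PySem.Str.lower model)]; exact Bool.eq_false_iff.mpr c2) | (rw [pvC3 (PySem.Str.lower brand) (PySem.Str.lower model)]; exact Bool.eq_false_iff.mpr c3) | (rw [pvC4 (PySem.Str.lower brand) (PySem.Str.lower model)]; exact Bool.eq_false_iff.mpr c4) | (rw [pvC5 (PySem.Str.lower brand) (PySem.Str.lower model)]; exact Bool.eq_false_iff.mpr c5) | (rw [pvC6 (PySem.Str.lower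 brand) (PySem.Str.lower model)]; exact Bool.eq_false_iff.mpr c6)))]
                  decide
                · rw [if_neg c7]
                  by_cases c8 : (["rolls royce", "bentley", "lamborghini", "ferrari", "porsche", "maserati"].any (fun x => PySem.Str.isIn x (PySem.Str.lower brand))) = true
                  · rw [if_pos c8, pvAlt_eq_seg brand model 8 (pvStep (PySem.Str.lower brand) (PySem.Str.lower model) 8 (by norm_num) (by norm_num) (by rw [pvC8 (PySem.Str.lower brand) (PySem.Str.lower model)]; exact c8) (by intro j hj0 hjg; interval_cases j <;> first | (rw [pvC0 (PySem.Str.lower brand) (PySem.Str.lower model)]; exact Bool.eq_false_iff.mpr c0) | (rw [pvC1 (PySem.Str.lower brand) (PySem.Str.lower model)]; exact Bool.eq_false_iff.mpr c1) | (rw [pvC2 (PySem.Str.lower brand) (PySem.Str.lower model)]; exact Bool.eq_false_iff.mpr c2) | (rw [pvC3 (PySem.Str.lower brand) (PySem.Str.lower model)]; exact Bool.eq_false_iff.mpr c3) | (rw [pvC4 (PySem.Str.lower brand) (PySem.Str.lower model)]; exact Bool.eq_false_iff.mpr c4) | (rw [pvC5 (PySem.Str.lower brand) (PySem.Str.lower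 model)]; exact Bool.eq_false_iff.mpr c5) | (rw [pvC6 (PySem.Str.lower brand) (PySem.Str.lower model)]; exact Bool.eq_false_iff.mpr c6) | (rw [pvC7 (PySem.Str.lower brand) (PySem.Str.lower model)]; exact Bool.eq_false_iff.mpr c7)))]
                    decide
                  · rw [if_neg c8]
                    have hall : ∀ q, ¬ pvHitAll (PySem.Str.lower brand) (PySem.Str.lower model) q := by
                      intro q hq
                      obtain ⟨hq0, hq8, hc⟩ := (pvHitAll_iff _ _ q).mp hq
                      interval_cases q <;> first | (rw [pvC0 (PySem.Str.lower brand) (PySem.Str.lower model)] at hc; exact c0 hc) | (rw [pvC1 (PySem.Str.lower brand) (PySem.Str.lower model)] at hc; exact c1 hc) | (rw [pvC2 (PySem.Str.lower brand) (PySem.Str.lower model)] at hc; exact c2 hc) | (rw [pvC3 (PySem.Str.lower brand) (PySem.Str.lower model)] at hc; exact c3 hc) | (rw [pvC4 (PySem.Str.lower brand) (PySem.Str.lower model)] at hc; exact c4 hc) | (rw [pvC5 (PySem.Str.lower brand) (PySem.Str.lower model)] at hc; exact c5 hc) | (rw [pvC6 (PySem.Str.lower brand) (PySem.Str.lower model)]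 at hc; exact c6 hc) | (rw [pvC7 (PySem.Str.lower brand) (PySem.Str.lower model)] at hc; exact c7 hc) | (rw [pvC8 (PySem.Str.lower brand) (PySem.Str.lower model)] at hc; exact c8 hc)
                    exact (pvAlt_eq_default brand model ((pvBest_none_iff _ _).mpr hall)).symm
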